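-- pv_equiv track=rewrite | github.com/youngeun-dev/coding-test-practice | python/귤-고르기.py | solution
-- ===== SOURCE A (Python) =====
-- def solution(k, tangerine):
--     answer = 0
--     count = {}
--
--     for t in tangerine:
--         if t in count:
--             count[t] += 1
--         else:
--             count[t] = 1
--     count = sorted(count.items(), key=lambda x: x[1], reverse=True)
--
--     for t, cnt in count:
--         if k > 0:
--             k -= cnt
--             answer += 1
--
--     return answer
-- ===== SOURCE B (Python) =====
-- def solution(k, tangerine):
--     # Count frequencies, bucket the frequencies by counting, then walk bucket
--     # sizes from the largest count down, taking whole buckets arithmetically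
--     # instead of sorting and looping one group at a time.
--     freq = {}
--     for t in tangerine:
--         freq[t] = freq.get(t, 0) + 1
--     buckets = {}
--     for c in freq.values():
--         buckets[c] = buckets.get(c, 0) + 1
--     answer = 0
--     for c in range(max(buckets, default=0), 0, -1):
--         m = buckets.get(c, 0)
--         if m and k > 0:
--             take = min(m, -(-k // c))
--             answer += take
--             k -= take * c
--     return answer
-- ===== Notes on version B (the rewrite author's own statement) =====
-- stated objective: alternative
-- what changed: B replaces A's comparison sort of the (tangerine, count) items by a counting-sort style walk: it buckets the frequencies by value and walks bucket sizes from the largest count down, taking each whole bucket in one arithmetic step (ceiling division) instead of one loop iteration per group.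
import Mathlib
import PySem

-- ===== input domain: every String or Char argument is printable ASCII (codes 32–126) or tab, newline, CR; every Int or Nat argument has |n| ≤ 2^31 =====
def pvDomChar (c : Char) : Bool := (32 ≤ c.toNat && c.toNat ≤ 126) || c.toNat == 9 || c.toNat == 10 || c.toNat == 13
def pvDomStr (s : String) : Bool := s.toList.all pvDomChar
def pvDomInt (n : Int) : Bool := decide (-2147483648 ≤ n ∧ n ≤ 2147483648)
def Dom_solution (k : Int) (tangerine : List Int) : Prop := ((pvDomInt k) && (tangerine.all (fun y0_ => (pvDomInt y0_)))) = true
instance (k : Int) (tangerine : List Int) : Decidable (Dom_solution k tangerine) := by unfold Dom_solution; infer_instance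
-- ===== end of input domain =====

-- B replaces A's comparison sort of the count table by a counting-sort walk over
-- count buckets taken arithmetically, high count to low (alternative algorithm).

-- ===== PORT A =====
-- A's counting loop: `if t in count: count[t] += 1 else: count[t] = 1`
def pvCountA (tangerine : List Int) : PySem.Dict Int Int :=
  tangerine.foldl
    (fun d t => if d.contains t then d.modify t 0 (· + 1) else d.insert t 1)
    PySem.Dict.empty

def solution (k : Int) (tangerine : List Int) : Int :=
  -- count = sorted(count.items(), key=lambda x: x[1], reverse=True)
  let pairs := PySem.List.sorted (pvCountA tangerine).items (fun x => x.2) true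
  -- for t, cnt in count: if k > 0: k -= cnt; answer += 1
  let st := pairs.foldl
    (fun (st : Int × Int) p => if st.1 > 0 then (st.1 - p.2, st.2 + 1) else st)
    (k, 0)
  st.2

-- ===== PORT B =====
-- freq[t] = freq.get(t, 0) + 1
def pvFreqB (tangerine : List Int) : PySem.Dict Int Int :=
  tangerine.foldl (fun d t => d.insert t (d.getD t 0 + 1)) PySem.Dict.empty

-- buckets[c] = buckets.get(c, 0) + 1 over freq.values()
def pvBucketsB (tangerine : List Int) : PySem.Dict Int Int :=
  (pvFreqB tangerine).values.foldl (fun d c => d.insert c (d.getD c 0 + 1)) PySem.Dict.empty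

def solution_alt (k : Int) (tangerine : List Int) : Int :=
  let buckets := pvBucketsB tangerine
  -- for c in range(max(buckets, default=0), 0, -1): …
  let st := (PySem.List.pyRange (PySem.List.maxD buckets.keys (fun x => x) 0) 0 (-1)).foldl
    (fun (st : Int × Int) c =>
      let m := buckets.getD c 0
      if m ≠ 0 ∧ st.1 > 0 then
        -- take = min(m, -(-k // c)); answer += take; k -= take * c
        let take := min m (-(PySem.Int.floordiv (-st.1) c))
        (st.1 - take * c, st.2 + take)
      else st)
    (k, 0)
  st.2

-- ===== PRECONDITION & SPEC =====
def Spec_solution (k : Int) (tangerine : List Int) (out : Int) : Prop := out = solution_alt k tangerine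
instance (k : Int) (tangerine : List Int) (out : Int) : Decidable (Spec_solution k tangerine out) := by unfold Spec_solution; infer_instance

-- ===== CLAIM (what is proved, stated in full; the proofs are below) =====
def Claim_equal_solution : Prop := ∀ (k : Int) (tangerine : List Int), Dom_solution k tangerine → Spec_solution k tangerine (solution k tangerine)

-- ===== LEMMAS AND PROOFS =====

-- the body of A's per-group loop, as a step over a single group size
def gstep (st : Int × Int) (c : Int) : Int × Int :=
  if st.1 > 0 then (st.1 - c, st.2 + 1) else st

-- ceiling division -(-k // c), as written in B
def cdiv (k c : Int) : Int := -(PySem.Int.floordiv (-k) c)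

-- the multiset of counts, and its maximum, as B computes them
def pvVals (tangerine : List Int) : List Int := (PySem.Dict.counter tangerine).values

def pvMx (tangerine : List Int) : Int :=
  PySem.List.maxD (PySem.Dict.counter (pvVals tangerine)).keys (fun x => x) 0

-- A's counting dict is Counter(tangerine)
theorem pvCountA_eq (tangerine : List Int) : pvCountA tangerine = PySem.Dict.counter tangerine := by
  rw [pvCountA, PySem.Dict.counter_eq_foldl]
  apply PySem.List.foldl_congr_mem
  intro d t _
  by_cases hc : d.contains t
  · simp [hc]
  · have hc' : d.contains t = false := by simpa using hc
    simp only [hc, Bool.false_eq_true, if_false, PySem.Dict.modify,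
      PySem.Dict.getD_of_not_contains d 0 hc']
    norm_num

theorem pvFreqB_eq (tangerine : List Int) : pvFreqB tangerine = PySem.Dict.counter tangerine :=
  PySem.Dict.foldl_insert_getD_add_one_eq_counter tangerine

theorem pvBucketsB_eq (tangerine : List Int) :
    pvBucketsB tangerine = PySem.Dict.counter (pvVals tangerine) := by
  rw [pvBucketsB, pvFreqB_eq]
  exact PySem.Dict.foldl_insert_getD_add_one_eq_counter _

-- once the budget is exhausted, the greedy loop is the identity
theorem foldl_gstep_nonpos (l : List Int) (k a : Int) (hk : ¬ k > 0) :
    List.foldl gstep (k, a) l = (k, a) := by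
  induction l with
  | nil => rfl
  | cons c l ih => rw [List.foldl_cons]; simp only [gstep, hk, if_false]; exact ih

theorem cdiv_char (k c : Int) (hc : 0 < c) : (cdiv k c - 1) * c < k ∧ k ≤ cdiv k c * c :=
  (PySem.Int.neg_floordiv_neg_eq_iff_of_pos hc).mp rfl

theorem cdiv_pos (k c : Int) (hk : 0 < k) (hc : 0 < c) : 1 ≤ cdiv k c := by
  rcases cdiv_char k c hc with ⟨_, h2⟩
  nlinarith

theorem cdiv_eq_one (k c : Int) (hk : 0 < k) (hkc : k ≤ c) : cdiv k c = 1 := by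
  have hc : (0:Int) < c := by omega
  exact (PySem.Int.neg_floordiv_neg_eq_iff_of_pos hc).mpr (by constructor <;> nlinarith)

theorem cdiv_sub (k c : Int) (hc : 0 < c) (_hkc : 0 < k - c) : cdiv k c = cdiv (k - c) c + 1 := by
  rcases cdiv_char (k - c) c hc with ⟨h1, h2⟩
  exact (PySem.Int.neg_floordiv_neg_eq_iff_of_pos hc).mpr (by constructor <;> nlinarith)

-- a bucket of n groups of size c, taken in one arithmetic step
theorem foldl_gstep_replicate (n : Nat) (c k a : Int) (hc : 0 < c) (hk : 0 < k) :
    List.foldl gstep (k, a) (List.replicate n c) =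
      (k - min (n : Int) (cdiv k c) * c, a + min (n : Int) (cdiv k c)) := by
  induction n generalizing k a with
  | zero =>
    have h1 := cdiv_pos k c hk hc
    simp only [List.replicate_zero, List.foldl_nil, Nat.cast_zero]
    have : min (0 : Int) (cdiv k c) = 0 := by omega
    rw [this]
    simp
  | succ n ih =>
    rw [List.replicate_succ, List.foldl_cons]
    have hg : gstep (k, a) c = (k - c, a + 1) := by simp [gstep, hk]
    rw [hg]
    by_cases h2 : 0 < k - c
    · rw [ih (k - c) (a + 1) h2, cdiv_sub k c hc h2]
      have h3 := cdiv_pos (k - c) c h2 hc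
      have hmin : min ((n + 1 : Nat) : Int) (cdiv (k - c) c + 1)
          = min (n : Int) (cdiv (k - c) c) + 1 := by push_cast; omega
      rw [hmin]
      simp only [Prod.mk.injEq]
      constructor <;> ring
    · rw [foldl_gstep_nonpos _ _ _ (by omega)]
      rw [cdiv_eq_one k c hk (by omega)]
      have hmin : min ((n + 1 : Nat) : Int) 1 = 1 := by push_cast; omega
      rw [hmin]
      simp

-- B's per-bucket branch equals running A's per-group step n times
theorem bstep_eq (n : Nat) (c k a : Int) (hc : 0 < c) :
    (if (n : Int) ≠ 0 ∧ k > 0 then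
        (k - min (n : Int) (cdiv k c) * c, a + min (n : Int) (cdiv k c))
      else (k, a)) = List.foldl gstep (k, a) (List.replicate n c) := by
  by_cases hk : k > 0
  · rw [foldl_gstep_replicate n c k a hc hk]
    by_cases hn : (n : Int) ≠ 0
    · simp only [ne_eq, hn, not_false_eq_true, hk, and_self, if_true]
    · have h1 := cdiv_pos k c hk hc
      have hn0 : (n : Int) = 0 := by omega
      have : min ((n : Nat) : Int) (cdiv k c) = 0 := by omega
      simp [hn, this]
  · rw [foldl_gstep_nonpos _ _ _ hk]
    simp [hk]

theorem count_flatMap_rep (cs : List Int) (h : cs.Nodup) (f : Int → Nat) (x : Int) :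
    (cs.flatMap (fun c => List.replicate (f c) c)).count x = if x ∈ cs then f x else 0 := by
  induction cs with
  | nil => simp
  | cons c cs ih =>
    rcases List.nodup_cons.mp h with ⟨hc, ht⟩
    rw [List.flatMap_cons, List.count_append, List.count_replicate, ih ht]
    by_cases hx : x = c
    · subst hx
      simp [hc]
    · simp [hx, Ne.symm hx, List.mem_cons]

theorem le_maxD_id (xs : List Int) (d : Int) (v : Int) (hv : v ∈ xs) :
    v ≤ PySem.List.maxD xs (fun x => x) d := by
  cases h : PySem.List.max? xs (fun x : Int => x) with
  | some m =>
    have := PySem.List.max?_isMax h v hv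
    simpa [PySem.List.maxD, h] using this
  | none =>
    exfalso
    have : xs = [] := (PySem.List.max?_eq_none_iff xs _).mp h
    rw [this] at hv
    exact absurd hv (List.not_mem_nil)

-- every element of the count multiset is a positive number bounded by pvMx
theorem pvVals_bounds (tangerine : List Int) (v : Int) (hv : v ∈ pvVals tangerine) :
    0 < v ∧ v ≤ pvMx tangerine := by
  constructor
  · have : pvVals tangerine
        = (PySem.Set.ofList tangerine).map (fun t => ((tangerine.count t : Nat) : Int)) := by
      simp only [pvVals, PySem.Dict.values, PySem.Dict.items_counter, List.map_map]
      rfl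
    rw [this] at hv
    rcases List.mem_map.mp hv with ⟨t, ht, rfl⟩
    have : t ∈ tangerine := (PySem.Set.mem_ofList tangerine t).mp ht
    have := List.count_pos_iff.mpr this
    omega
  · apply le_maxD_id
    rw [PySem.Dict.keys_counter]
    exact (PySem.Set.mem_ofList _ v).mpr hv

-- the bucket walk enumerates exactly the count multiset, largest counts first
theorem repList_perm (tangerine : List Int) :
    ((PySem.List.pyRange (pvMx tangerine) 0 (-1)).flatMap
        (fun c => List.replicate ((pvVals tangerine).count c) c)).Perm (pvVals tangerine) := by
  have hnd : (PySem.List.pyRange (pvMx tangerine) 0 (-1)).Nodup := by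
    rw [PySem.List.pyRange_neg_one_eq_reverse]
    exact List.nodup_reverse.mpr (PySem.List.nodup_pyRange_one _ _)
  rw [List.perm_iff_count]
  intro x
  rw [count_flatMap_rep _ hnd]
  by_cases hx : x ∈ PySem.List.pyRange (pvMx tangerine) 0 (-1)
  · simp [hx]
  · simp only [hx, if_false]
    by_cases hv : x ∈ pvVals tangerine
    · exfalso
      rcases pvVals_bounds tangerine x hv with ⟨h1, h2⟩
      exact hx (PySem.List.mem_pyRange_neg_one.mpr ⟨h1, h2⟩)
    · simp [List.count_eq_zero_of_not_mem hv]

theorem pairwise_flatMap_rep (cs : List Int) (h : cs.Pairwise (· > ·)) (f : Int → Nat) :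
    (cs.flatMap (fun c => List.replicate (f c) c)).Pairwise (fun a b => b ≤ a) := by
  induction cs with
  | nil => simp
  | cons c cs ih =>
    rcases List.pairwise_cons.mp h with ⟨hc, ht⟩
    rw [List.flatMap_cons, List.pairwise_append]
    refine ⟨List.pairwise_replicate.mpr (Or.inr le_rfl), ih ht, ?_⟩
    intro a ha b hb
    have ha' : a = c := List.eq_of_mem_replicate ha
    rcases List.mem_flatMap.mp hb with ⟨c', hc', hb'⟩
    have hb'' : b = c' := List.eq_of_mem_replicate hb'
    have := hc c' hc'
    omega

-- the two descending count lists coincide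
theorem lists_eq (tangerine : List Int) :
    (PySem.List.sorted (PySem.Dict.counter tangerine).items (fun x => x.2) true).map (fun p => p.2)
      = (PySem.List.pyRange (pvMx tangerine) 0 (-1)).flatMap
          (fun c => List.replicate ((pvVals tangerine).count c) c) := by
  apply List.Perm.eq_of_pairwise (le := fun a b : Int => b ≤ a)
  · intro a b _ _ h1 h2; omega
  · exact List.pairwise_map.mpr (PySem.List.sorted_pairwise_rev _ _)
  · rw [PySem.List.pyRange_neg_one_eq_reverse]
    apply pairwise_flatMap_rep
    rw [List.pairwise_reverse]
    exact PySem.List.pairwise_lt_pyRange_one _ _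
  · refine List.Perm.trans ?_ (repList_perm tangerine).symm
    have h1 : ((PySem.List.sorted (PySem.Dict.counter tangerine).items (fun x => x.2) true).map
        (fun p => p.2)).Perm ((PySem.Dict.counter tangerine).items.map (fun p => p.2)) :=
      (PySem.List.sorted_perm _ _ _).map _
    exact h1

-- A computed through gstep over the descending list of counts
theorem solution_eq_gfold (k : Int) (tangerine : List Int) :
    solution k tangerine = (List.foldl gstep (k, 0)
      ((PySem.List.sorted (PySem.Dict.counter tangerine).items (fun x => x.2) true).map
        (fun p => p.2))).2 := by
  simp only [solution, pvCountA_eq]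
  rw [List.foldl_map]
  rfl

-- B computed through gstep over the bucket expansion
theorem solution_alt_eq_gfold (k : Int) (tangerine : List Int) :
    solution_alt k tangerine = (List.foldl gstep (k, 0)
      ((PySem.List.pyRange (pvMx tangerine) 0 (-1)).flatMap
        (fun c => List.replicate ((pvVals tangerine).count c) c))).2 := by
  simp only [solution_alt, pvBucketsB_eq, PySem.Dict.keys_counter]
  rw [List.foldl_flatMap]
  congr 1
  have hmx : PySem.List.maxD (PySem.Set.ofList (pvVals tangerine)) (fun x => x) 0
      = pvMx tangerine := by
    rw [pvMx, PySem.Dict.keys_counter]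
  rw [hmx]
  apply PySem.List.foldl_congr_mem
  intro st c hcmem
  obtain ⟨sk, sa⟩ := st
  have hc : 0 < c := (PySem.List.mem_pyRange_neg_one.mp hcmem).1
  have hget : (PySem.Dict.counter (pvVals tangerine)).getD c 0
      = (((pvVals tangerine).count c : Nat) : Int) := PySem.Dict.getD_counter _ _
  simp only [hget]
  exact bstep_eq ((pvVals tangerine).count c) c sk sa hc

-- ===== VERDICT (by name: the statement is the Claim_ definition above) =====
theorem solution_spec : Claim_equal_solution := by
  intro k tangerine _
  unfold Spec_solution
  rw [solution_eq_gfold, solution_alt_eq_gfold, lists_eq]
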